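-- pv_equiv track=rewrite | github.com/thumbe12856/competitive-programming | cf/1700 Pekora and Trampoline/solve.py | solve
-- ===== SOURCE A (Python) =====
-- def solve(N, nums):
--     ans = 0
--     for i in range(N):
--         temp = 0
--         for j in range(i):
--             temp += max(0, nums[j] - (i - j))
--         ans = max(ans, temp + nums[i] - 1)
--     return ans
-- ===== SOURCE B (Python) =====
-- def solve(N, nums):
--     # O(N): each nums[j] contributes a decreasing ramp to later positions;
--     # accumulate ramps with count/value difference arrays, then one prefix pass.
--     cnt = [0] * (N + 1)
--     base = [0] * (N + 1)
--     for j in range(N):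
--         if nums[j] >= 2:
--             lo, hi = j + 1, min(N, j + nums[j])
--             w = nums[j] + j
--             cnt[lo] += 1
--             cnt[hi] -= 1
--             base[lo] += w
--             base[hi] -= w
--     ans = c = b = 0
--     for i in range(N):
--         c += cnt[i]
--         b += base[i]
--         ans = max(ans, b - c * i + nums[i] - 1)
--     return ans
-- ===== Notes on version B (the rewrite author's own statement) =====
-- stated objective: faster
-- what changed: Replaced the quadratic recomputation of each prefix sum of clipped ramps by count/value difference arrays accumulated once per element, followed by a single prefix-sum pass.
import Mathlib
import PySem

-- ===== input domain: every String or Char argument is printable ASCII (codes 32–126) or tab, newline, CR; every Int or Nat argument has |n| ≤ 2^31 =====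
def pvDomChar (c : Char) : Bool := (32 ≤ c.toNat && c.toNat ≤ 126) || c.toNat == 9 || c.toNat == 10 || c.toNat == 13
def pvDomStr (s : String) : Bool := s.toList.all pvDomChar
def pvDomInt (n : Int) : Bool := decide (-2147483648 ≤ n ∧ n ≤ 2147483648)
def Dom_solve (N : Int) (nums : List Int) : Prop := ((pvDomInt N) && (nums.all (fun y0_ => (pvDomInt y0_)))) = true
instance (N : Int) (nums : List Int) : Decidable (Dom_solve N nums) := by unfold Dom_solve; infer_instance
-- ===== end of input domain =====

-- B replaces A's O(N^2) double loop by count/value difference arrays plus one prefix-sum pass (O(N)); equal return values on Pre_.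

-- ===== PORT A =====
def solve (N : Int) (nums : List Int) : Int :=
  (PySem.List.pyRange 0 N 1).foldl (fun ans i =>
    let temp := (PySem.List.pyRange 0 i 1).foldl
      (fun temp j => temp + max 0 (PySem.List.pyGetD nums j 0 - (i - j))) 0
    max ans (temp + PySem.List.pyGetD nums i 0 - 1)) 0

-- ===== PORT B =====
-- 'l[k] += v' on a Python list (index k here is always 0 ≤ k < len in B's loops)
def bump (l : List Int) (k : Int) (v : Int) : List Int := l.modify k.toNat (· + v)

def solve_alt (N : Int) (nums : List Int) : Int :=
  let cb := (PySem.List.pyRange 0 N 1).foldl (fun (cb : List Int × List Int) j =>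
      let x := PySem.List.pyGetD nums j 0
      if 2 ≤ x then
        let lo := j + 1
        let hi := min N (j + x)
        let w := x + j
        (bump (bump cb.1 lo 1) hi (-1), bump (bump cb.2 lo w) hi (-w))
      else cb)
    (List.replicate (N + 1).toNat 0, List.replicate (N + 1).toNat 0)
  let s := (PySem.List.pyRange 0 N 1).foldl (fun (s : Int × Int × Int) i =>
      let c := s.2.1 + PySem.List.pyGetD cb.1 i 0
      let b := s.2.2 + PySem.List.pyGetD cb.2 i 0
      (max s.1 (b - c * i + PySem.List.pyGetD nums i 0 - 1), c, b)) (0, 0, 0)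
  s.1

-- ===== PRECONDITION & SPEC =====
-- A (and B) raise IndexError exactly when N exceeds len(nums); Pre_ excludes only those inputs.
def Pre_solve (N : Int) (nums : List Int) : Prop := N ≤ nums.length
instance (N : Int) (nums : List Int) : Decidable (Pre_solve N nums) := by unfold Pre_solve; infer_instance
def pvWitness_solve : Int × List Int := (3, [2, 3, 1])
def Spec_solve (N : Int) (nums : List Int) (out : Int) : Prop := out = solve_alt N nums
instance (N : Int) (nums : List Int) (out : Int) : Decidable (Spec_solve N nums out) := by unfold Spec_solve; infer_instance

-- ===== CLAIM (what is proved, stated in full; the proofs are below) =====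
def Claim_equal_solve : Prop := ∀ (N : Int) (nums : List Int), Dom_solve N nums → Pre_solve N nums → Spec_solve N nums (solve N nums)

-- ===== LEMMAS AND PROOFS =====

-- prefix sum of the first m entries
def preSum (l : List Int) (m : Nat) : Int := (l.take m).sum

-- the j-loop body of B's port, named for the proofs (definitionally the port's lambda)
def stepCB (N : Int) (nums : List Int) (cb : List Int × List Int) (j : Int) : List Int × List Int :=
  if 2 ≤ PySem.List.pyGetD nums j 0 then
    (bump (bump cb.1 (j + 1) 1) (min N (j + PySem.List.pyGetD nums j 0)) (-1),
     bump (bump cb.2 (j + 1) (PySem.List.pyGetD nums j 0 + j)) (min N (j + PySem.List.pyGetD nums j 0))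
       (-(PySem.List.pyGetD nums j 0 + j)))
  else cb

-- contribution of iteration j to preSum cnt m / preSum base m (len = length of the arrays)
def cC (N : Int) (nums : List Int) (len m : Nat) (j : Int) : Int :=
  if 2 ≤ PySem.List.pyGetD nums j 0 then
    (if (j + 1).toNat < m ∧ (j + 1).toNat < len then (1 : Int) else 0)
    + (if (min N (j + PySem.List.pyGetD nums j 0)).toNat < m ∧
          (min N (j + PySem.List.pyGetD nums j 0)).toNat < len then (-1 : Int) else 0)
  else 0

def bC (N : Int) (nums : List Int) (len m : Nat) (j : Int) : Int :=
  if 2 ≤ PySem.List.pyGetD nums j 0 then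
    (if (j + 1).toNat < m ∧ (j + 1).toNat < len then PySem.List.pyGetD nums j 0 + j else 0)
    + (if (min N (j + PySem.List.pyGetD nums j 0)).toNat < m ∧
          (min N (j + PySem.List.pyGetD nums j 0)).toNat < len
       then -(PySem.List.pyGetD nums j 0 + j) else 0)
  else 0

-- A's inner-loop term
def gA (nums : List Int) (i j : Nat) : Int := max 0 (nums.getD j 0 - ((i : Int) - (j : Int)))

lemma length_bump (l : List Int) (k v : Int) : (bump l k v).length = l.length := by
  simp [bump]

lemma preSum_succ (l : List Int) (m : Nat) (h : m < l.length) :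
    preSum l (m + 1) = preSum l m + l.getD m 0 := by
  unfold preSum
  rw [List.take_add_one, List.getElem?_eq_getElem h]
  simp [h]

lemma preSum_modify (l : List Int) (t : Nat) (v : Int) (m : Nat) :
    preSum (l.modify t (· + v)) m = preSum l m + if t < m ∧ t < l.length then v else 0 := by
  induction l generalizing t m with
  | nil => simp [preSum]
  | cons a l ih =>
    cases t with
    | zero =>
      cases m with
      | zero => simp [preSum]
      | succ m => simp [preSum]; ring_nf
    | succ t =>
      cases m with
      | zero => simp [preSum]
      | succ m =>
        simp only [List.modify_succ_cons, preSum, List.take_succ_cons, List.sum_cons,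
          List.length_cons]
        have hih := ih t m
        unfold preSum at hih
        rw [hih]
        have hiff : (t < m ∧ t < l.length) ↔ (t + 1 < m + 1 ∧ t + 1 < l.length + 1) := by omega
        rw [if_congr hiff rfl rfl]
        exact (add_assoc _ _ _).symm

lemma preSum_bump (l : List Int) (k v : Int) (m : Nat) :
    preSum (bump l k v) m = preSum l m + if k.toNat < m ∧ k.toNat < l.length then v else 0 := by
  simpa [bump] using preSum_modify l k.toNat v m

lemma preSum_replicate (len m : Nat) : preSum (List.replicate len (0 : Int)) m = 0 := by
  simp [preSum, List.take_replicate]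

lemma step_len (N : Int) (nums : List Int) (cb : List Int × List Int) (j : Int) :
    (stepCB N nums cb j).1.length = cb.1.length ∧ (stepCB N nums cb j).2.length = cb.2.length := by
  unfold stepCB; split <;> simp [length_bump]

lemma step_pre (N : Int) (nums : List Int) (len m : Nat) (cb : List Int × List Int)
    (h1 : cb.1.length = len) (h2 : cb.2.length = len) (j : Int) :
    preSum (stepCB N nums cb j).1 m = preSum cb.1 m + cC N nums len m j ∧
    preSum (stepCB N nums cb j).2 m = preSum cb.2 m + bC N nums len m j := by
  unfold stepCB cC bC
  split
  · constructor
    · rw [preSum_bump, preSum_bump, length_bump, h1]; ring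
    · rw [preSum_bump, preSum_bump, length_bump, h2]; ring
  · simp

-- j-loop invariant: lengths are preserved and prefix sums accumulate the per-j contributions
lemma loop1 (N : Int) (nums : List Int) (len m : Nat) (L : List Int) :
    ∀ (cb : List Int × List Int), cb.1.length = len → cb.2.length = len →
    (L.foldl (stepCB N nums) cb).1.length = len ∧
    (L.foldl (stepCB N nums) cb).2.length = len ∧
    preSum (L.foldl (stepCB N nums) cb).1 m = preSum cb.1 m + (L.map (cC N nums len m)).sum ∧
    preSum (L.foldl (stepCB N nums) cb).2 m = preSum cb.2 m + (L.map (bC N nums len m)).sum := by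
  induction L with
  | nil => intro cb h1 h2; simp [h1, h2]
  | cons j L ih =>
    intro cb h1 h2
    simp only [List.foldl_cons, List.map_cons, List.sum_cons]
    have hl := step_len N nums cb j
    have hp := step_pre N nums len m cb h1 h2 j
    obtain ⟨a1, a2, a3, a4⟩ := ih (stepCB N nums cb j) (hl.1.trans h1) (hl.2.trans h2)
    exact ⟨a1, a2, by rw [a3, hp.1]; ring, by rw [a4, hp.2]; ring⟩

-- i-loop: the second loop maintains (running answer, preSum cnt (i+1), preSum base (i+1))
lemma loop2 (cnt base nums : List Int) (n : Nat) (hc : n ≤ cnt.length) (hb : n ≤ base.length) :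
    (List.range n).foldl (fun (s : Int × Int × Int) (k : Nat) =>
        (max s.1 ((s.2.2 + PySem.List.pyGetD base (k : Int) 0)
            - (s.2.1 + PySem.List.pyGetD cnt (k : Int) 0) * (k : Int)
            + PySem.List.pyGetD nums (k : Int) 0 - 1),
          s.2.1 + PySem.List.pyGetD cnt (k : Int) 0,
          s.2.2 + PySem.List.pyGetD base (k : Int) 0)) ((0 : Int), (0 : Int), (0 : Int))
    = ((List.range n).foldl (fun a (i : Nat) =>
        max a (preSum base (i + 1) - preSum cnt (i + 1) * (i : Int)
          + PySem.List.pyGetD nums (i : Int) 0 - 1)) 0,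
      preSum cnt n, preSum base n) := by
  induction n with
  | zero => simp [preSum]
  | succ n ih =>
    have hc' : n ≤ cnt.length := by omega
    have hb' : n ≤ base.length := by omega
    rw [List.range_succ, List.foldl_append, List.foldl_append, ih hc' hb']
    simp only [List.foldl_cons, List.foldl_nil]
    rw [show PySem.List.pyGetD cnt (n : Int) 0 = cnt.getD n 0 from PySem.List.pyGetD_natCast cnt n 0,
        show PySem.List.pyGetD base (n : Int) 0 = base.getD n 0 from PySem.List.pyGetD_natCast base n 0,
        preSum_succ cnt n (by omega), preSum_succ base n (by omega)]


lemma termwise (N : Int) (nums : List Int) (n i k : Nat) (hN : (n : Int) = N) (hi : i < n)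
    (hk : k < n) :
    bC N nums (N + 1).toNat (i + 1) (k : Int) - cC N nums (N + 1).toNat (i + 1) (k : Int) * (i : Int)
      = if k < i then gA nums i k else 0 := by
  unfold bC cC gA
  rw [PySem.List.pyGetD_natCast]
  subst hN
  split_ifs <;> omega

-- A's result as a fold over List.range of the inner sums
lemma A_eq (N : Int) (nums : List Int) :
    solve N nums = (List.range N.toNat).foldl (fun a (i : Nat) =>
      max a (((List.range i).map (gA nums i)).sum + PySem.List.pyGetD nums (i : Int) 0 - 1)) 0 := by
  unfold solve
  rw [PySem.List.pyRange_one]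
  simp only [Int.sub_zero, zero_add, List.foldl_map]
  apply PySem.List.foldl_congr_mem
  intro acc i _
  rw [PySem.List.pyRange_one]
  simp only [Int.sub_zero, Int.toNat_natCast, List.foldl_map, zero_add]
  rw [PySem.List.foldl_add]
  simp only [zero_add, PySem.List.pyGetD_natCast]
  rfl

-- B's result as the same fold with the prefix sums of its difference arrays
lemma B_eq (N : Int) (nums : List Int) :
    solve_alt N nums = (List.range N.toNat).foldl (fun a (i : Nat) =>
      max a (preSum (((List.range N.toNat).map (fun k : Nat => (k : Int))).foldl (stepCB N nums)
                (List.replicate (N + 1).toNat 0, List.replicate (N + 1).toNat 0)).2 (i + 1)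
             - preSum (((List.range N.toNat).map (fun k : Nat => (k : Int))).foldl (stepCB N nums)
                (List.replicate (N + 1).toNat 0, List.replicate (N + 1).toNat 0)).1 (i + 1) * (i : Int)
             + PySem.List.pyGetD nums (i : Int) 0 - 1)) 0 := by
  unfold solve_alt
  rw [PySem.List.pyRange_one]
  simp only [Int.sub_zero, zero_add]
  have hcb : ∀ (L : List Int) (cb : List Int × List Int),
      L.foldl (fun (cb : List Int × List Int) (j : Int) =>
        if 2 ≤ PySem.List.pyGetD nums j 0 then
          (bump (bump cb.1 (j + 1) 1) (min N (j + PySem.List.pyGetD nums j 0)) (-1),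
           bump (bump cb.2 (j + 1) (PySem.List.pyGetD nums j 0 + j))
             (min N (j + PySem.List.pyGetD nums j 0)) (-(PySem.List.pyGetD nums j 0 + j)))
        else cb) cb
      = L.foldl (stepCB N nums) cb := fun L cb => rfl
  rw [hcb]
  set cb := ((List.range N.toNat).map (fun k : Nat => (k : Int))).foldl (stepCB N nums)
      (List.replicate (N + 1).toNat 0, List.replicate (N + 1).toNat 0) with hcbdef
  have hl1 : (List.replicate (N + 1).toNat (0 : Int)).length = (N + 1).toNat := by simp
  obtain ⟨hlen1, hlen2, -, -⟩ := loop1 N nums (N + 1).toNat 0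
    ((List.range N.toNat).map (fun k : Nat => (k : Int)))
    (List.replicate (N + 1).toNat 0, List.replicate (N + 1).toNat 0) hl1 hl1
  have hc : N.toNat ≤ cb.1.length := by rw [hcbdef, hlen1]; omega
  have hb : N.toNat ≤ cb.2.length := by rw [hcbdef, hlen2]; omega
  rw [List.foldl_map]
  have := loop2 cb.1 cb.2 nums N.toNat hc hb
  rw [this]

-- the pointwise bridge: B's prefix-sum expression equals A's inner sum
lemma key (N : Int) (nums : List Int) (i : Nat) (hi : i < N.toNat) :
    preSum (((List.range N.toNat).map (fun k : Nat => (k : Int))).foldl (stepCB N nums)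
        (List.replicate (N + 1).toNat 0, List.replicate (N + 1).toNat 0)).2 (i + 1)
      - preSum (((List.range N.toNat).map (fun k : Nat => (k : Int))).foldl (stepCB N nums)
        (List.replicate (N + 1).toNat 0, List.replicate (N + 1).toNat 0)).1 (i + 1) * (i : Int)
    = ((List.range i).map (gA nums i)).sum := by
  have hN : ((N.toNat : Nat) : Int) = N := by omega
  have hl1 : (List.replicate (N + 1).toNat (0 : Int)).length = (N + 1).toNat := by simp
  obtain ⟨-, -, h3, h4⟩ := loop1 N nums (N + 1).toNat (i + 1)
    ((List.range N.toNat).map (fun k : Nat => (k : Int)))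
    (List.replicate (N + 1).toNat 0, List.replicate (N + 1).toNat 0) hl1 hl1
  rw [h3, h4, preSum_replicate]
  simp only [zero_add, List.map_map, Function.comp_def]
  have e1 : ∀ (F : Nat → Int), ((List.range N.toNat).map F).sum = ∑ k ∈ Finset.range N.toNat, F k :=
    fun F => rfl
  have e2 : ((List.range i).map (gA nums i)).sum = ∑ k ∈ Finset.range i, gA nums i k := rfl
  rw [e1, e1, e2, Finset.sum_mul, ← Finset.sum_sub_distrib]
  have estep : ∀ k ∈ Finset.range N.toNat,
      bC N nums (N + 1).toNat (i + 1) (k : Int) - cC N nums (N + 1).toNat (i + 1) (k : Int) * (i : Int)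
        = if k < i then gA nums i k else 0 := by
    intro k hk
    exact termwise N nums N.toNat i k hN hi (Finset.mem_range.mp hk)
  rw [Finset.sum_congr rfl estep]
  have hsub : Finset.range i ⊆ Finset.range N.toNat := by
    intro x hx; simp only [Finset.mem_range] at *; omega
  rw [← Finset.sum_subset hsub (fun x _ hnx => if_neg (by simpa using hnx))]
  exact Finset.sum_congr rfl (fun x hx => if_pos (Finset.mem_range.mp hx))

-- ===== VERDICT (by name: the statement is the Claim_ definition above) =====
theorem solve_spec : Claim_equal_solve := by
  intro N nums _ _
  unfold Spec_solve
  rw [A_eq, B_eq]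
  apply PySem.List.foldl_congr_mem
  intro acc i hi
  rw [key N nums i (List.mem_range.mp hi)]
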